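-- pv_equiv track=rewrite | github.com/DucDung-1107/OPTIMIZATION-MINI-PROJECT | Simulated annealing.py | get_valid_start_slots_for_duration
-- ===== SOURCE A (Python) =====
-- def get_valid_start_slots_for_duration(duration, max_slots=60, slots_per_block=6):
--     valid_starts = []
--     if duration > slots_per_block: # Lớp quá dài cho một buổi
--         return []
--     for block_start_slot in range(1, max_slots + 1, slots_per_block):
--         for offset in range(slots_per_block - duration + 1):
--             start_slot = block_start_slot + offset
--             if start_slot + duration -1 <= block_start_slot + slots_per_block -1: # Ensure it ends within the block
--                  valid_starts.append(start_slot)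
--     return sorted(list(set(valid_starts))) # unique and sorted
-- ===== SOURCE B (Python) =====
-- def get_valid_start_slots_for_duration(duration, max_slots=60, slots_per_block=6):
--     if duration > slots_per_block:
--         return []
--     blocks = range(1, max_slots + 1, slots_per_block)
--     if not blocks:
--         return []
--     top = blocks[-1] + slots_per_block - duration
--     return [s for s in range(1, top + 1)
--             if (s - 1) % slots_per_block <= slots_per_block - duration]
-- ===== Notes on version B (the rewrite author's own statement) =====
-- stated objective: alternative
-- what changed: Replaced A's nested block/offset loops followed by set-dedup and sort with a single flat pass over candidate slot numbers that keeps s when its within-block offset (s-1) % slots_per_block fits the duration, producing the sorted deduplicated list directly.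
-- outside the precondition, e.g. on get_valid_start_slots_for_duration(-3, -5, -2): A returns [-3, -2, -1, 0, 1, 2], B returns []; on get_valid_start_slots_for_duration(0, 5, 0): A raises ValueError, B raises ValueError
import Mathlib
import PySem

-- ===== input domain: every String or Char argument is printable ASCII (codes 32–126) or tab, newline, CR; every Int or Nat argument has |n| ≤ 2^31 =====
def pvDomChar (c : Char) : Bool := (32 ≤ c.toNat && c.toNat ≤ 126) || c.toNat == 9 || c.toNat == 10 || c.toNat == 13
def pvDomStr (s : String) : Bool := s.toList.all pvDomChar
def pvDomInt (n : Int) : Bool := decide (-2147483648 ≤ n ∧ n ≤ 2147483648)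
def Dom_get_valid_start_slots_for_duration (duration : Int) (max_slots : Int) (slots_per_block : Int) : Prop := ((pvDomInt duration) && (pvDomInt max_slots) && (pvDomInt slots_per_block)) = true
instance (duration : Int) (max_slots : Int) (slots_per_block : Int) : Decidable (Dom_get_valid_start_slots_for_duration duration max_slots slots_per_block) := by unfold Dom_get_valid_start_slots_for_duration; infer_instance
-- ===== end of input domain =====

-- B replaces A's nested block/offset loops (plus set-dedup and sort) by one flat filtered
-- range of candidate slots using a modular within-block-offset test; objective: alternative
-- decomposition (no speed claim).

-- ===== PORT A =====
def get_valid_start_slots_for_duration (duration : Int) (max_slots : Int) (slots_per_block : Int) : List Int :=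
  if duration > slots_per_block then
    []
  else
    let valid_starts : List Int :=
      (PySem.List.pyRange 1 (max_slots + 1) slots_per_block).foldl
        (fun acc block_start_slot =>
          (PySem.List.pyRange 0 (slots_per_block - duration + 1) 1).foldl
            (fun acc2 offset =>
              let start_slot := block_start_slot + offset
              if start_slot + duration - 1 ≤ block_start_slot + slots_per_block - 1 then
                acc2 ++ [start_slot]
              else
                acc2)
            acc)
        []
    PySem.List.sorted (PySem.Set.ofList valid_starts) (fun x => x)

-- ===== PORT B =====
def get_valid_start_slots_for_duration_alt (duration : Int) (max_slots : Int) (slots_per_block : Int) : List Int :=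
  if duration > slots_per_block then
    []
  else
    let blocks := PySem.List.pyRange 1 (max_slots + 1) slots_per_block
    if blocks = [] then
      []
    else
      match PySem.List.pyGet? blocks (-1) with
      | none => []  -- unreachable: blocks is nonempty
      | some last =>
        let top := last + slots_per_block - duration
        (PySem.List.pyRange 1 (top + 1) 1).filter
          (fun s => decide (PySem.Int.mod (s - 1) slots_per_block ≤ slots_per_block - duration))

-- ===== PRECONDITION & SPEC =====
-- Pre_ keeps the natural domain slots_per_block ≥ 1 and, of the degenerate rest, exactly the
-- inputs where A trivially returns []: it excludes slots_per_block = 0 (A raises ValueError,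
-- range step zero) and negative slots_per_block with max_slots < 0 and duration ≤ slots_per_block,
-- where A's nonempty answer comes from a meaningless descending block range.
def Pre_get_valid_start_slots_for_duration (duration : Int) (max_slots : Int) (slots_per_block : Int) : Prop :=
  1 ≤ slots_per_block ∨ (slots_per_block ≤ -1 ∧ (0 ≤ max_slots ∨ slots_per_block < duration))
instance (duration : Int) (max_slots : Int) (slots_per_block : Int) : Decidable (Pre_get_valid_start_slots_for_duration duration max_slots slots_per_block) := by unfold Pre_get_valid_start_slots_for_duration; infer_instance

def pvWitness_get_valid_start_slots_for_duration : Int × Int × Int := (2, 10, 3)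

def Spec_get_valid_start_slots_for_duration (duration : Int) (max_slots : Int) (slots_per_block : Int) (out : List Int) : Prop := out = get_valid_start_slots_for_duration_alt duration max_slots slots_per_block
instance (duration : Int) (max_slots : Int) (slots_per_block : Int) (out : List Int) : Decidable (Spec_get_valid_start_slots_for_duration duration max_slots slots_per_block out) := by unfold Spec_get_valid_start_slots_for_duration; infer_instance

-- ===== CLAIM (what is proved, stated in full; the proofs are below) =====
def Claim_equal_get_valid_start_slots_for_duration : Prop := ∀ (duration : Int) (max_slots : Int) (slots_per_block : Int), Dom_get_valid_start_slots_for_duration duration max_slots slots_per_block → Pre_get_valid_start_slots_for_duration duration max_slots slots_per_block → Spec_get_valid_start_slots_for_duration duration max_slots slots_per_block (get_valid_start_slots_for_duration duration max_slots slots_per_block)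

-- ===== LEMMAS AND PROOFS =====

-- range(1, max_slots+1, slots_per_block) is empty for a negative step and 0 ≤ max_slots
lemma pyRange_neg_step_nil (m P : Int) (hP : P ≤ -1) (hm : 0 ≤ m) :
    PySem.List.pyRange 1 (m + 1) P = [] := by
  unfold PySem.List.pyRange
  have h1 : ¬ (P = 0) := by omega
  have h2 : ¬ (0 < P) := by omega
  have h3 : ¬ (m + 1 < 1) := by omega
  simp [h1, h2, h3]

-- the arithmetic core: membership in A's nested enumeration vs B's flat modular test
lemma mem_core (d m P : Int) (hP : 1 ≤ P) (hm : 1 ≤ m) (x : Int) :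
    (∃ b, (1 ≤ b ∧ b < m + 1 ∧ P ∣ b - 1) ∧ ∃ o, (0 ≤ o ∧ o < P - d + 1) ∧ b + o = x)
    ↔ (1 ≤ x ∧ x < 1 + P * ((m - 1) / P) + P - d + 1) ∧ (x - 1) % P ≤ P - d := by
  have hP0 : (0:Int) < P := by omega
  have hPne : P ≠ 0 := by omega
  have hPJ : P * ((m - 1) / P) ≤ m - 1 := by
    have h1 := Int.mul_ediv_add_emod (m - 1) P
    have h2 := Int.emod_nonneg (m - 1) hPne
    omega
  constructor
  · rintro ⟨b, ⟨hb1, hb2, j, hbj⟩, o, ⟨ho1, ho2⟩, rfl⟩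
    have hj0 : 0 ≤ j := by nlinarith
    have hjJ : j ≤ (m - 1) / P := (Int.le_ediv_iff_mul_le hP0).2 (by nlinarith)
    have hmul : P * j ≤ P * ((m - 1) / P) := by nlinarith
    refine ⟨⟨by omega, by omega⟩, ?_⟩
    have hx : b + o - 1 = o + P * j := by omega
    rw [hx, Int.add_mul_emod_self_left]
    by_cases hoP : o < P
    · rw [Int.emod_eq_of_lt ho1 hoP]; omega
    · have h3 := Int.emod_lt_of_pos o hP0
      have h4 := Int.emod_nonneg o hPne
      omega
  · rintro ⟨⟨hx1, hx2⟩, hx3⟩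
    have hqr := Int.mul_ediv_add_emod (x - 1) P
    have hr0 := Int.emod_nonneg (x - 1) hPne
    have hrP := Int.emod_lt_of_pos (x - 1) hP0
    have hq0 : 0 ≤ (x - 1) / P := Int.ediv_nonneg (by omega) (by omega)
    by_cases hqJ : (x - 1) / P ≤ (m - 1) / P
    · refine ⟨1 + P * ((x - 1) / P), ⟨by nlinarith, ?_, ⟨(x - 1) / P, by ring⟩⟩,
        (x - 1) % P, ⟨hr0, by omega⟩, by omega⟩
      have : P * ((x - 1) / P) ≤ P * ((m - 1) / P) := by nlinarith
      omega
    · have hJ0 : 0 ≤ (m - 1) / P := Int.ediv_nonneg (by omega) (by omega)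
      have hPJ0 : 0 ≤ P * ((m - 1) / P) := mul_nonneg (by omega) hJ0
      refine ⟨1 + P * ((m - 1) / P), ⟨by omega, by omega, ⟨(m - 1) / P, by ring⟩⟩,
        x - (1 + P * ((m - 1) / P)), ⟨?_, by omega⟩, by ring⟩
      have : P * ((m - 1) / P + 1) ≤ P * ((x - 1) / P) := by nlinarith
      nlinarith

-- A's accumulated list, in flatMap form (main case)
lemma valid_starts_eq (d m P : Int) :
    ((PySem.List.pyRange 1 (m + 1) P).foldl
        (fun acc block_start_slot =>
          (PySem.List.pyRange 0 (P - d + 1) 1).foldl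
            (fun acc2 offset =>
              let start_slot := block_start_slot + offset
              if start_slot + d - 1 ≤ block_start_slot + P - 1 then
                acc2 ++ [start_slot]
              else
                acc2)
            acc)
        ([] : List Int))
    = (PySem.List.pyRange 1 (m + 1) P).flatMap
        (fun b => (PySem.List.pyRange 0 (P - d + 1) 1).map (fun o => b + o)) := by
  have hfn : (fun (acc : List Int) (b : Int) =>
      (PySem.List.pyRange 0 (P - d + 1) 1).foldl
        (fun acc2 offset =>
          let start_slot := b + offset
          if start_slot + d - 1 ≤ b + P - 1 then acc2 ++ [start_slot] else acc2)
        acc)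
      = (fun acc b => acc ++ (PySem.List.pyRange 0 (P - d + 1) 1).map (fun o => b + o)) := by
    funext acc b
    have h := PySem.List.foldl_append_ite
      (fun o : Int => b + o + d - 1 ≤ b + P - 1) (fun o : Int => b + o)
      (PySem.List.pyRange 0 (P - d + 1) 1) acc
    simp only at h ⊢
    rw [h]
    congr 1
    have hflt : (PySem.List.pyRange 0 (P - d + 1) 1).filter
        (fun o => decide (b + o + d - 1 ≤ b + P - 1)) = PySem.List.pyRange 0 (P - d + 1) 1 := by
      apply List.filter_eq_self.2
      intro o ho
      have := (PySem.List.mem_pyRange_one).1 ho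
      simp only [decide_eq_true_eq]
      omega
    rw [hflt]
  rw [hfn, PySem.List.foldl_append_eq_flatMap]
  simp

-- the last element of a nonempty positive-step range, as 1 + P * ((m-1)/P)
lemma last_block (m P : Int) (hP : 1 ≤ P) (hm : 1 ≤ m) :
    (PySem.List.pyRange 1 (m + 1) P).getLast? = some (1 + P * ((m - 1) / P)) := by
  rw [PySem.List.pyRange_of_pos 1 (m + 1) (by omega)]
  have hlt : (1:Int) < m + 1 := by omega
  rw [if_pos hlt]
  have hcnt : (m + 1 - 1 + P - 1) / P = (m - 1) / P + 1 := by
    have h : m + 1 - 1 + P - 1 = (m - 1) + 1 * P := by ring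
    rw [h, Int.add_mul_ediv_right _ _ (by omega : P ≠ 0)]
  rw [hcnt]
  have hJ0 : 0 ≤ (m - 1) / P := Int.ediv_nonneg (by omega) (by omega)
  have hnpos : 0 < ((m - 1) / P + 1).toNat := by omega
  rw [List.getLast?_eq_getElem?]
  simp only [List.length_map, List.length_range]
  rw [List.getElem?_map, List.getElem?_range (by omega : ((m - 1) / P + 1).toNat - 1 < ((m - 1) / P + 1).toNat)]
  simp only [Option.map_some]
  have hcast : ((((m - 1) / P + 1).toNat - 1 : Nat) : Int) = (m - 1) / P := by omega
  rw [hcast]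

lemma nonempty_blocks (m P : Int) (hP : 1 ≤ P) (hm : 1 ≤ m) :
    PySem.List.pyRange 1 (m + 1) P ≠ [] := by
  intro h
  have h1 : (1:Int) ∈ PySem.List.pyRange 1 (m + 1) P :=
    (PySem.List.mem_pyRange_iff_of_pos (by omega : (0:Int) < P) 1).2
      ⟨le_refl 1, by omega, by simp⟩
  rw [h] at h1
  exact List.not_mem_nil h1

lemma empty_blocks (m P : Int) (hP : 1 ≤ P) (hm : m ≤ 0) :
    PySem.List.pyRange 1 (m + 1) P = [] := by
  unfold PySem.List.pyRange
  have h1 : ¬ (P = 0) := by omega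
  have h2 : (0:Int) < P := by omega
  have h3 : ¬ ((1:Int) < m + 1) := by omega
  simp [h1, h2, h3]

-- ===== VERDICT (by name: the statement is the Claim_ definition above) =====
theorem get_valid_start_slots_for_duration_spec : Claim_equal_get_valid_start_slots_for_duration := by
  intro d m P _ hpre
  unfold Spec_get_valid_start_slots_for_duration
  unfold get_valid_start_slots_for_duration get_valid_start_slots_for_duration_alt
  by_cases hdP : d > P
  · simp [hdP]
  · rw [if_neg hdP, if_neg hdP]
    rcases hpre with hP | ⟨hP, hcase⟩
    · -- slots_per_block ≥ 1
      by_cases hm : 1 ≤ m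
      · -- nonempty blocks: the real case
        have hne := nonempty_blocks m P hP hm
        simp only [if_neg hne, PySem.List.pyGet?_neg_one, last_block m P hP hm]
        rw [valid_starts_eq d m P]
        apply PySem.List.sorted_eq_of_perm_of_pairwise_lt
        · -- the filtered range is a permutation of the dedup'd flatMap
          rw [List.perm_ext_iff_of_nodup
            (List.Nodup.sublist List.filter_sublist (PySem.List.nodup_pyRange_one _ _))
            (PySem.Set.nodup_ofList _)]
          intro x
          rw [PySem.Set.mem_ofList]
          simp only [List.mem_filter, List.mem_flatMap, List.mem_map,
            PySem.List.mem_pyRange_one,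
            PySem.List.mem_pyRange_iff_of_pos (by omega : (0:Int) < P),
            decide_eq_true_eq, PySem.Int.mod_eq_emod_of_pos (by omega : (0:Int) < P)]
          exact (mem_core d m P hP hm x).symm
        · exact List.Pairwise.sublist List.filter_sublist (PySem.List.pairwise_lt_pyRange_one _ _)
      · -- max_slots ≤ 0: both sides are []
        have he := empty_blocks m P hP (by omega)
        simp [he, PySem.List.sorted_eq_nil_iff]
    · -- negative slots_per_block inside Pre_: duration ≤ slots_per_block forces 0 ≤ max_slots,
      -- the block range is empty and both sides return []
      have hm : 0 ≤ m := by omega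
      have he := pyRange_neg_step_nil m P hP hm
      simp [he, PySem.List.sorted_eq_nil_iff]
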